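-- pv_equiv track=rewrite | github.com/Kunlun-Zhu/Snowball-QA | answer_extractor/utils.py | correct_end_tag
-- ===== SOURCE A (Python) =====
-- def correct_end_tag(end_list: list, pos: int, tag_list: list) -> int:
--     # combine the same tag with the last word into the answer
--     index_e = end_list.index(pos) + 1
--     tot_len = len(tag_list)
--     while index_e < tot_len:
--         if (tag_list[index_e] == tag_list[index_e - 1]):
--             pos = end_list[index_e]
--         else:
--             break
--         index_e += 1
--     not_end_list = ['c', 'dg', 'd', 'h', 'p', 'u', 'v', 'vd']  # list of tag should not be the end
--     re_tagging = (index_e < tot_len and (str(tag_list[index_e - 1]) in not_end_list))  # the end tag need to re-process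
--     while index_e < tot_len and (str(tag_list[index_e - 1]) in not_end_list):
--         pos = end_list[index_e]
--         index_e += 1
--     if re_tagging:
--         while index_e < tot_len:
--             if (tag_list[index_e] == tag_list[index_e - 1]):
--                 pos = end_list[index_e]
--             else:
--                 break
--             index_e += 1
--     return pos
-- ===== SOURCE B (Python) =====
-- _NOT_END = frozenset(('c', 'dg', 'd', 'h', 'p', 'u', 'v', 'vd'))
--
--
-- def correct_end_tag(end_list: list, pos: int, tag_list: list) -> int:
--     n = len(tag_list)
--     s = end_list.index(pos) + 1
--     # one backward pass: run[i] = length of the maximal equal-tag run starting at i,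
--     # spec[i] = length of the maximal not-end-tag run starting at i (0 if tag i may end)
--     run = [1] * n
--     spec = [0] * n
--     for i in range(n - 1, -1, -1):
--         if i + 1 < n and tag_list[i + 1] == tag_list[i]:
--             run[i] = run[i + 1] + 1
--         if str(tag_list[i]) in _NOT_END:
--             spec[i] = spec[i + 1] + 1 if i + 1 < n and str(tag_list[i + 1]) in _NOT_END else 1
--     # phase 1 (merge equal tags): jump to just past the run containing s-1
--     i1 = s - 1 + run[s - 1] if s - 1 < n else s
--     # phase 2 (skip not-end tags): jump past the not-end run containing i1-1
--     re_tagging = i1 < n and spec[i1 - 1] > 0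
--     i2 = min(n, i1 + spec[i1 - 1]) if i1 - 1 < n else i1
--     # phase 3 (merge again), only when phase 2 was entered with tags left
--     i3 = i2 - 1 + run[i2 - 1] if re_tagging else i2
--     return end_list[i3 - 1]
-- ===== Notes on version B (the rewrite author's own statement) =====
-- stated objective: alternative
-- what changed: B replaces A's three forward scanning while-loops by a single backward precomputation pass building run-length tables (run[i] = length of the equal-tag run starting at i, spec[i] = length of the not-end-tag run starting at i); each of A's phases then becomes one O(1) table lookup and arithmetic jump, and the answer is read once as end_list[i3-1].
-- outside the precondition, e.g. on correct_end_tag([5], 5, ['a', 'b']): A returns 5, B returns 5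
import Mathlib
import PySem

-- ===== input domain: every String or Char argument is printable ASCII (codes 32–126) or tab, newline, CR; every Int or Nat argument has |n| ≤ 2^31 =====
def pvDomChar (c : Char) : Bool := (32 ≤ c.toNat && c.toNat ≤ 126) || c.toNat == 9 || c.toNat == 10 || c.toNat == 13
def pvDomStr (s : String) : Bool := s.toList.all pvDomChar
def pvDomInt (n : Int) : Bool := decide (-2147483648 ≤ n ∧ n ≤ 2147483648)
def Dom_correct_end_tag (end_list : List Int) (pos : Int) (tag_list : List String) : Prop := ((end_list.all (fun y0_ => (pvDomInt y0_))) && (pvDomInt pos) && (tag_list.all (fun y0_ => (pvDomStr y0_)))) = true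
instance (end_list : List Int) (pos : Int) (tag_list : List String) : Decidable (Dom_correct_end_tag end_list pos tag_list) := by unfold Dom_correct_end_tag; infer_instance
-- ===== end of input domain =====

-- B replaces A's three forward while-loops by one backward precomputation pass building
-- run-length tables; each phase becomes a table lookup and an arithmetic jump.

-- ===== PORT A =====
-- A's not_end_list literal
def pvA_notEnd : List String := ["c", "dg", "d", "h", "p", "u", "v", "vd"]

-- first while loop: merge equal adjacent tags, updating pos (indices are in range under Pre_,
-- so getD is exact for Python's tag_list[index_e] / end_list[index_e])
def pvA_loop1 (end_list : List Int) (tag_list : List String) (pos : Int) (i : Nat) : Int × Nat :=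
  if i < tag_list.length then
    if tag_list.getD i "" = tag_list.getD (i - 1) "" then
      pvA_loop1 end_list tag_list (end_list.getD i 0) (i + 1)
    else (pos, i)
  else (pos, i)
termination_by tag_list.length - i

-- second while loop: skip while the previous tag is in not_end_list
def pvA_loop2 (end_list : List Int) (tag_list : List String) (pos : Int) (i : Nat) : Int × Nat :=
  if i < tag_list.length then
    if pvA_notEnd.contains (tag_list.getD (i - 1) "") then
      pvA_loop2 end_list tag_list (end_list.getD i 0) (i + 1)
    else (pos, i)
  else (pos, i)
termination_by tag_list.length - i

-- third while loop (A's source repeats the merge loop verbatim)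
def pvA_loop3 (end_list : List Int) (tag_list : List String) (pos : Int) (i : Nat) : Int × Nat :=
  if i < tag_list.length then
    if tag_list.getD i "" = tag_list.getD (i - 1) "" then
      pvA_loop3 end_list tag_list (end_list.getD i 0) (i + 1)
    else (pos, i)
  else (pos, i)
termination_by tag_list.length - i

def correct_end_tag (end_list : List Int) (pos : Int) (tag_list : List String) : Int :=
  match PySem.List.index? end_list pos with
  | none => 0  -- Python raises ValueError here; excluded by Pre_
  | some idx =>
    let r1 := pvA_loop1 end_list tag_list pos (idx + 1)
    let re_tagging : Bool :=
      decide (r1.2 < tag_list.length) && pvA_notEnd.contains (tag_list.getD (r1.2 - 1) "")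
    let r2 := pvA_loop2 end_list tag_list r1.1 r1.2
    if re_tagging then (pvA_loop3 end_list tag_list r2.1 r2.2).1 else r2.1

-- ===== PORT B =====
def pvB_notEnd : List String := ["c", "dg", "d", "h", "p", "u", "v", "vd"]

-- Source B's backward for-loop building run[] and spec[]: structural recursion from the right;
-- run[i] = length of the maximal equal-tag run starting at i, spec[i] = length of the
-- maximal not-end-tag run starting at i (0 if tag i may end)
def pvB_runs : List String → List Nat × List Nat
  | [] => ([], [])
  | x :: xs =>
    let p := pvB_runs xs
    let r : Nat :=
      match xs, p.1 with
      | y :: _, r0 :: _ => if y = x then r0 + 1 else 1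
      | _, _ => 1
    let s : Nat :=
      if pvB_notEnd.contains x then
        (match xs, p.2 with
         | y :: _, s0 :: _ => if pvB_notEnd.contains y then s0 + 1 else 1
         | _, _ => 1)
      else 0
    (r :: p.1, s :: p.2)

def correct_end_tag_alt (end_list : List Int) (pos : Int) (tag_list : List String) : Int :=
  match PySem.List.index? end_list pos with
  | none => 0  -- Python raises ValueError here; excluded by Pre_
  | some idx =>
    let n := tag_list.length
    let s := idx + 1
    let tab := pvB_runs tag_list
    let i1 := if s - 1 < n then s - 1 + tab.1.getD (s - 1) 1 else s
    let re_tagging : Bool := decide (i1 < n) && decide (0 < tab.2.getD (i1 - 1) 0)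
    let i2 := if i1 - 1 < n then min n (i1 + tab.2.getD (i1 - 1) 0) else i1
    let i3 := if re_tagging then i2 - 1 + tab.1.getD (i2 - 1) 1 else i2
    end_list.getD (i3 - 1) 0

-- ===== PRECONDITION & SPEC =====
-- Pre_ requires pos ∈ end_list (else A raises ValueError) and tag_list no longer than end_list:
-- with a shorter end_list A may raise IndexError mid-loop depending on how far the loops advance,
-- so this closed-form bound also excludes some short-end_list inputs on which A happens to return.
def Pre_correct_end_tag (end_list : List Int) (pos : Int) (tag_list : List String) : Prop :=
  pos ∈ end_list ∧ tag_list.length ≤ end_list.length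
instance (end_list : List Int) (pos : Int) (tag_list : List String) : Decidable (Pre_correct_end_tag end_list pos tag_list) := by unfold Pre_correct_end_tag; infer_instance

def pvWitness_correct_end_tag : List Int × Int × List String := ([3, 7], 3, ["n", "n"])

def Spec_correct_end_tag (end_list : List Int) (pos : Int) (tag_list : List String) (out : Int) : Prop := out = correct_end_tag_alt end_list pos tag_list
instance (end_list : List Int) (pos : Int) (tag_list : List String) (out : Int) : Decidable (Spec_correct_end_tag end_list pos tag_list out) := by unfold Spec_correct_end_tag; infer_instance

-- ===== CLAIM (what is proved, stated in full; the proofs are below) =====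
def Claim_equal_correct_end_tag : Prop := ∀ (end_list : List Int) (pos : Int) (tag_list : List String), Dom_correct_end_tag end_list pos tag_list → Pre_correct_end_tag end_list pos tag_list → Spec_correct_end_tag end_list pos tag_list (correct_end_tag end_list pos tag_list)

-- ===== LEMMAS AND PROOFS =====

-- proof-only index functions: the index reached by A's merge / skip loops
def pvMerge (t : List String) (i : Nat) : Nat :=
  if i < t.length then
    if t.getD i "" = t.getD (i - 1) "" then pvMerge t (i + 1) else i
  else i
termination_by t.length - i

def pvSkip (t : List String) (i : Nat) : Nat :=
  if i < t.length then
    if pvA_notEnd.contains (t.getD (i - 1) "") then pvSkip t (i + 1) else i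
  else i
termination_by t.length - i

theorem pvMerge_notlt (t : List String) (i : Nat) (h : ¬ i < t.length) : pvMerge t i = i := by
  rw [pvMerge]; simp [h]

theorem pvSkip_notlt (t : List String) (i : Nat) (h : ¬ i < t.length) : pvSkip t i = i := by
  rw [pvSkip]; simp [h]

theorem pvMerge_le (t : List String) : ∀ k i, t.length - i ≤ k → i ≤ t.length → pvMerge t i ≤ t.length := by
  intro k
  induction k with
  | zero => intro i hk hi; rw [pvMerge_notlt t i (by omega)]; exact hi
  | succ k ih =>
    intro i hk hi
    rw [pvMerge]
    split_ifs with h1 h2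
    · exact ih (i + 1) (by omega) (by omega)
    · exact hi
    · exact hi

theorem pvMerge_ge (t : List String) : ∀ k i, t.length - i ≤ k → i ≤ pvMerge t i := by
  intro k
  induction k with
  | zero => intro i hk; rw [pvMerge_notlt t i (by omega)]
  | succ k ih =>
    intro i hk
    rw [pvMerge]
    split_ifs with h1 h2
    · have := ih (i + 1) (by omega); omega
    · exact le_refl i
    · exact le_refl i

theorem pvSkip_le (t : List String) : ∀ k i, t.length - i ≤ k → i ≤ t.length → pvSkip t i ≤ t.length := by
  intro k
  induction k with
  | zero => intro i hk hi; rw [pvSkip_notlt t i (by omega)]; exact hi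
  | succ k ih =>
    intro i hk hi
    rw [pvSkip]
    split_ifs with h1 h2
    · exact ih (i + 1) (by omega) (by omega)
    · exact hi
    · exact hi

theorem pvSkip_ge (t : List String) : ∀ k i, t.length - i ≤ k → i ≤ pvSkip t i := by
  intro k
  induction k with
  | zero => intro i hk; rw [pvSkip_notlt t i (by omega)]
  | succ k ih =>
    intro i hk
    rw [pvSkip]
    split_ifs with h1 h2
    · have := ih (i + 1) (by omega); omega
    · exact le_refl i
    · exact le_refl i

-- shifting the loops along one cons cell
theorem pvMerge_shift (x : String) (xs : List String) :
    ∀ k i, xs.length - i ≤ k → 1 ≤ i → pvMerge (x :: xs) (i + 1) = pvMerge xs i + 1 := by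
  intro k
  induction k with
  | zero =>
    intro i hk hi
    have h1 := pvMerge_notlt xs i (by omega)
    have h2 := pvMerge_notlt (x :: xs) (i + 1) (by simp only [List.length_cons]; omega)
    rw [h1, h2]
  | succ k ih =>
    intro i hk hi
    conv_lhs => rw [pvMerge]
    conv_rhs => rw [pvMerge]
    have h2 : (x :: xs).getD (i + 1) "" = xs.getD i "" := by simp
    have h3 : (x :: xs).getD (i + 1 - 1) "" = xs.getD (i - 1) "" := by
      have : i + 1 - 1 = (i - 1) + 1 := by omega
      rw [this]; simp
    simp only [List.length_cons, Nat.add_lt_add_iff_right, h2, h3]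
    split_ifs with ha hb
    · exact ih (i + 1) (by omega) (by omega)
    · rfl
    · rfl

theorem pvSkip_shift (x : String) (xs : List String) :
    ∀ k i, xs.length - i ≤ k → 1 ≤ i → pvSkip (x :: xs) (i + 1) = pvSkip xs i + 1 := by
  intro k
  induction k with
  | zero =>
    intro i hk hi
    have h1 := pvSkip_notlt xs i (by omega)
    have h2 := pvSkip_notlt (x :: xs) (i + 1) (by simp only [List.length_cons]; omega)
    rw [h1, h2]
  | succ k ih =>
    intro i hk hi
    conv_lhs => rw [pvSkip]
    conv_rhs => rw [pvSkip]
    have h3 : (x :: xs).getD (i + 1 - 1) "" = xs.getD (i - 1) "" := by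
      have : i + 1 - 1 = (i - 1) + 1 := by omega
      rw [this]; simp
    simp only [List.length_cons, Nat.add_lt_add_iff_right, h3]
    split_ifs with ha hb
    · exact ih (i + 1) (by omega) (by omega)
    · rfl
    · rfl

-- destructuring the table heads
theorem runs1_succ (x : String) (xs : List String) (j : Nat) :
    (pvB_runs (x :: xs)).1.getD (j + 1) 1 = (pvB_runs xs).1.getD j 1 := by
  simp [pvB_runs]

theorem runs2_succ (x : String) (xs : List String) (j : Nat) :
    (pvB_runs (x :: xs)).2.getD (j + 1) 0 = (pvB_runs xs).2.getD j 0 := by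
  simp [pvB_runs]

theorem runs1_len (t : List String) : (pvB_runs t).1.length = t.length := by
  induction t with
  | nil => simp [pvB_runs]
  | cons x xs ih => simp [pvB_runs, ih]

theorem runs2_len (t : List String) : (pvB_runs t).2.length = t.length := by
  induction t with
  | nil => simp [pvB_runs]
  | cons x xs ih => simp [pvB_runs, ih]

theorem runs1_cons (x y : String) (ys : List String) :
    (pvB_runs (x :: y :: ys)).1.getD 0 1
      = if y = x then (pvB_runs (y :: ys)).1.getD 0 1 + 1 else 1 := by
  cases hr : (pvB_runs (y :: ys)).1 with
  | nil => have := runs1_len (y :: ys); rw [hr] at this; simp at this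
  | cons r0 rl =>
    have key : (pvB_runs (x :: y :: ys)).1.getD 0 1
        = (match y :: ys, (pvB_runs (y :: ys)).1 with
           | y' :: _, r0' :: _ => if y' = x then r0' + 1 else 1
           | _, _ => 1) := rfl
    rw [key, hr]
    simp

theorem runs1_single (x : String) : (pvB_runs [x]).1.getD 0 1 = 1 := by
  simp [pvB_runs]

theorem runs2_cons (x y : String) (ys : List String) :
    (pvB_runs (x :: y :: ys)).2.getD 0 0
      = if pvB_notEnd.contains x then
          (if pvB_notEnd.contains y then (pvB_runs (y :: ys)).2.getD 0 0 + 1 else 1)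
        else 0 := by
  cases hs : (pvB_runs (y :: ys)).2 with
  | nil => have := runs2_len (y :: ys); rw [hs] at this; simp at this
  | cons s0 sl =>
    have key : (pvB_runs (x :: y :: ys)).2.getD 0 0
        = (if pvB_notEnd.contains x then
            (match y :: ys, (pvB_runs (y :: ys)).2 with
             | y' :: _, s0' :: _ => if pvB_notEnd.contains y' then s0' + 1 else 1
             | _, _ => 1)
          else 0) := rfl
    rw [key, hs]
    simp

theorem runs2_single (x : String) :
    (pvB_runs [x]).2.getD 0 0 = if pvB_notEnd.contains x then 1 else 0 := by
  simp [pvB_runs]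

-- unfolding the loops one step at position 1
theorem pvMerge_one (x y : String) (ys : List String) :
    pvMerge (x :: y :: ys) 1 = if y = x then pvMerge (x :: y :: ys) 2 else 1 := by
  rw [pvMerge]; simp

theorem pvMerge_one_single (x : String) : pvMerge [x] 1 = 1 := by
  rw [pvMerge]; simp

theorem pvSkip_one (x : String) (xs : List String) :
    pvSkip (x :: xs) 1
      = if 1 < xs.length + 1 then (if pvA_notEnd.contains x then pvSkip (x :: xs) 2 else 1) else 1 := by
  rw [pvSkip]; simp

-- run[j] lookup computes the merge loop's stopping index
theorem pvB_runs_fst (t : List String) :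
    ∀ j, j < t.length → j + (pvB_runs t).1.getD j 1 = pvMerge t (j + 1) := by
  induction t with
  | nil => intro j hj; simp at hj
  | cons x xs ih =>
    intro j hj
    cases j with
    | zero =>
      cases xs with
      | nil => rw [runs1_single, pvMerge_one_single]
      | cons y ys =>
        rw [runs1_cons, pvMerge_one]
        by_cases hy : y = x
        · rw [if_pos hy, if_pos hy]
          have hshift := pvMerge_shift x (y :: ys) ((y :: ys).length - 1) 1 (le_refl _) (le_refl _)
          rw [show (2 : Nat) = 1 + 1 from rfl, hshift]
          have := ih 0 (by simp)
          simp only [Nat.zero_add] at this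
          omega
        · rw [if_neg hy, if_neg hy]
    | succ j' =>
      have hj' : j' < xs.length := by simpa using hj
      have hshift := pvMerge_shift x xs (xs.length - (j' + 1)) (j' + 1) (le_refl _) (by omega)
      rw [runs1_succ, hshift]
      have := ih j' hj'
      omega

-- pvA_notEnd and pvB_notEnd coincide
theorem notEnd_eq : pvB_notEnd = pvA_notEnd := rfl

-- spec[j] is positive iff tag j is a not-end tag
theorem pvB_runs_snd_pos (t : List String) :
    ∀ j, j < t.length → (0 < (pvB_runs t).2.getD j 0 ↔ pvA_notEnd.contains (t.getD j "") = true) := by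
  induction t with
  | nil => intro j hj; simp at hj
  | cons x xs ih =>
    intro j hj
    cases j with
    | zero =>
      have hx0 : (x :: xs).getD 0 "" = x := by simp
      rw [hx0, ← notEnd_eq]
      cases xs with
      | nil =>
        rw [runs2_single]
        by_cases hx : pvB_notEnd.contains x = true
        · rw [if_pos hx]
          exact ⟨fun _ => hx, fun _ => Nat.one_pos⟩
        · rw [if_neg hx]
          exact ⟨fun h => absurd h (lt_irrefl 0), fun h => absurd h hx⟩
      | cons y ys =>
        rw [runs2_cons]
        by_cases hx : pvB_notEnd.contains x = true
        · rw [if_pos hx]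
          refine ⟨fun _ => hx, fun _ => ?_⟩
          split_ifs <;> omega
        · rw [if_neg hx]
          exact ⟨fun h => absurd h (lt_irrefl 0), fun h => absurd h hx⟩
    | succ j' =>
      have hj' : j' < xs.length := by simpa using hj
      rw [runs2_succ]
      simpa using ih j' hj'

-- spec[j] lookup computes the skip loop's stopping index
theorem pvB_runs_snd (t : List String) :
    ∀ j, j < t.length → min t.length (j + 1 + (pvB_runs t).2.getD j 0) = pvSkip t (j + 1) := by
  induction t with
  | nil => intro j hj; simp at hj
  | cons x xs ih =>
    intro j hj
    cases j with
    | zero =>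
      rw [show (0 + 1 : Nat) = 1 from rfl, pvSkip_one]
      cases xs with
      | nil =>
        rw [runs2_single]
        simp only [List.length_cons, List.length_nil]
        split_ifs <;> omega
      | cons y ys =>
        rw [runs2_cons]
        have hlt : 1 < (y :: ys).length + 1 := by simp
        rw [if_pos hlt]
        by_cases hx : pvB_notEnd.contains x = true
        · have hxA : pvA_notEnd.contains x = true := hx
          rw [if_pos hx, if_pos hxA]
          have hshift := pvSkip_shift x (y :: ys) ((y :: ys).length - 1) 1 (le_refl _) (le_refl _)
          rw [show (2 : Nat) = 1 + 1 from rfl, hshift]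
          have h0 := ih 0 (by simp)
          rw [show (0 + 1 : Nat) = 1 from rfl] at h0
          by_cases hy : pvB_notEnd.contains y = true
          · rw [if_pos hy]
            simp only [List.length_cons] at h0 ⊢
            omega
          · rw [if_neg hy]
            have hsk : pvSkip (y :: ys) 1 = 1 := by
              rw [pvSkip]
              have hgy : (y :: ys).getD (1 - 1) "" = y := by simp
              rw [hgy]
              split_ifs with h1 h2
              · exact absurd h2 hy
              · rfl
              · rfl
            rw [hsk]
            simp only [List.length_cons]
            omega
        · have hxA : ¬ pvA_notEnd.contains x = true := hx
          rw [if_neg hx, if_neg hxA]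
          simp only [List.length_cons]
          omega
    | succ j' =>
      have hj' : j' < xs.length := by simpa using hj
      have hshift := pvSkip_shift x xs (xs.length - (j' + 1)) (j' + 1) (le_refl _) (by omega)
      rw [runs2_succ, hshift]
      have := ih j' hj'
      simp only [List.length_cons]
      omega

-- A's loops return (end_list[j-1], j) where j is the corresponding index function
theorem loop1_merge (e : List Int) (t : List String) :
    ∀ (k i : Nat) (pos : Int), t.length - i ≤ k → pos = e.getD (i - 1) 0 →
      pvA_loop1 e t pos i = (e.getD (pvMerge t i - 1) 0, pvMerge t i) := by
  intro k
  induction k with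
  | zero =>
    intro i pos hk hp
    have hi : ¬ i < t.length := by omega
    rw [pvA_loop1, pvMerge]
    simp [hi, hp]
  | succ k ih =>
    intro i pos hk hp
    rw [pvA_loop1, pvMerge]
    split_ifs with h1 h2
    · exact ih (i + 1) _ (by omega) (by simp)
    · simp [hp]
    · simp [hp]

theorem loop3_merge (e : List Int) (t : List String) :
    ∀ (k i : Nat) (pos : Int), t.length - i ≤ k → pos = e.getD (i - 1) 0 →
      pvA_loop3 e t pos i = (e.getD (pvMerge t i - 1) 0, pvMerge t i) := by
  intro k
  induction k with
  | zero =>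
    intro i pos hk hp
    have hi : ¬ i < t.length := by omega
    rw [pvA_loop3, pvMerge]
    simp [hi, hp]
  | succ k ih =>
    intro i pos hk hp
    rw [pvA_loop3, pvMerge]
    split_ifs with h1 h2
    · exact ih (i + 1) _ (by omega) (by simp)
    · simp [hp]
    · simp [hp]

theorem loop2_skip (e : List Int) (t : List String) :
    ∀ (k i : Nat) (pos : Int), t.length - i ≤ k → pos = e.getD (i - 1) 0 →
      pvA_loop2 e t pos i = (e.getD (pvSkip t i - 1) 0, pvSkip t i) := by
  intro k
  induction k with
  | zero =>
    intro i pos hk hp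
    have hi : ¬ i < t.length := by omega
    rw [pvA_loop2, pvSkip]
    simp [hi, hp]
  | succ k ih =>
    intro i pos hk hp
    rw [pvA_loop2, pvSkip]
    split_ifs with h1 h2
    · exact ih (i + 1) _ (by omega) (by simp)
    · simp [hp]
    · simp [hp]

-- ===== VERDICT (by name: the statement is the Claim_ definition above) =====
theorem correct_end_tag_spec : Claim_equal_correct_end_tag := by
  intro e pos t _ hpre
  unfold Spec_correct_end_tag correct_end_tag correct_end_tag_alt
  rcases hpre with ⟨hmem, _⟩
  have hsome : (PySem.List.index? e pos).isSome := (PySem.List.index?_isSome_iff e pos).mpr hmem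
  obtain ⟨idx, hidx⟩ := Option.isSome_iff_exists.mp hsome
  rw [hidx]
  dsimp only
  obtain ⟨hlt, hget, _⟩ := PySem.List.getElem_of_index?_eq_some hidx
  have hp0 : pos = e.getD ((idx + 1) - 1) 0 := by
    simp [List.getD_eq_getElem?_getD, hlt, hget.symm]
  rw [loop1_merge e t (t.length - (idx + 1)) (idx + 1) pos (le_refl _) hp0]
  set n := t.length with hn
  set s := idx + 1 with hs
  by_cases hsn : s - 1 < n
  · -- main case: phase-1 lookup applies
    have hM1 := pvB_runs_fst t (s - 1) hsn
    have hs1 : s - 1 + 1 = s := by omega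
    rw [hs1] at hM1
    set M1 := pvMerge t s with hM1def
    have hi1 : (if s - 1 < n then s - 1 + (pvB_runs t).1.getD (s - 1) 1 else s) = M1 := by
      rw [if_pos hsn]; omega
    rw [hi1]
    have hM1le : M1 ≤ n := pvMerge_le t (n - s) s (le_refl _) (by omega)
    have hM1ge : s ≤ M1 := pvMerge_ge t (n - s) s (le_refl _)
    have hM1pos : 1 ≤ M1 := by omega
    have hM11 : M1 - 1 < n := by omega
    have hi2 : (if M1 - 1 < n then min n (M1 + (pvB_runs t).2.getD (M1 - 1) 0) else M1)
        = pvSkip t M1 := by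
      rw [if_pos hM11]
      have := pvB_runs_snd t (M1 - 1) hM11
      have h1 : M1 - 1 + 1 = M1 := by omega
      rw [h1] at this
      omega
    rw [hi2]
    have h2nd : decide (0 < (pvB_runs t).2.getD (M1 - 1) 0)
        = pvA_notEnd.contains (t.getD (M1 - 1) "") := by
      have hiff := pvB_runs_snd_pos t (M1 - 1) hM11
      by_cases hc : pvA_notEnd.contains (t.getD (M1 - 1) "") = true
      · rw [hc, decide_eq_true (hiff.mpr hc)]
      · have hnp : ¬ 0 < (pvB_runs t).2.getD (M1 - 1) 0 := fun hp => hc (hiff.mp hp)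
        rw [decide_eq_false hnp, (Bool.eq_false_iff.mpr hc)]
    rw [h2nd]
    rw [loop2_skip e t (n - M1) M1 _ (le_refl _) rfl]
    set M2 := pvSkip t M1 with hM2def
    by_cases hreb : (decide (M1 < n) && pvA_notEnd.contains (t.getD (M1 - 1) "")) = true
    · rw [if_pos hreb, if_pos hreb]
      have hM1lt : M1 < n := by
        rcases Bool.and_eq_true_iff.mp hreb with ⟨h, _⟩
        exact of_decide_eq_true h
      have hM2le : M2 ≤ n := pvSkip_le t (n - M1) M1 (le_refl _) (by omega)
      have hM2ge : M1 ≤ M2 := pvSkip_ge t (n - M1) M1 (le_refl _)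
      have hM21 : M2 - 1 < n := by omega
      have h3 := pvB_runs_fst t (M2 - 1) hM21
      have h1 : M2 - 1 + 1 = M2 := by omega
      rw [h1] at h3
      rw [loop3_merge e t (n - M2) M2 _ (le_refl _) rfl]
      have : M2 - 1 + (pvB_runs t).1.getD (M2 - 1) 1 = pvMerge t M2 := h3
      rw [this]
    · rw [if_neg (by simpa using hreb), if_neg (by simpa using hreb)]
  · -- degenerate case: s - 1 ≥ n, every loop is a no-op
    have hsn' : ¬ s < n := by omega
    rw [if_neg hsn]
    have hM1 : pvMerge t s = s := pvMerge_notlt t s hsn'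
    rw [hM1]
    rw [loop2_skip e t (n - s) s _ (le_refl _) rfl]
    have hM2 : pvSkip t s = s := pvSkip_notlt t s hsn'
    rw [hM2]
    simp [hsn', hsn]
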